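-- pv_equiv track=rewrite | github.com/Jeseoyun/algorithm-study | 백준/Gold/21608. 상어 초등학교/상어 초등학교.py | find_empty_seat_info
-- ===== SOURCE A (Python) =====
-- dxy = [(-1, 0), (0, -1), (1, 0), (0, 1)]
--
-- def find_empty_seat_info(seats, n, preference):
--     empty_seats = []
--     for x in range(n):
--         for y in range(n):
--             if seats[x][y] != 0:  # 이미 누가 앉아 있음
--                 continue
--
--             near_empty_cnt = 0
--             near_preference = 0
--
--             for dx, dy in dxy:
--                 nx, ny = x + dx, y + dy
--
--                 if nx < 0 or nx >= n or ny < 0 or ny >= n:  # 자리 범위 초과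
--                     continue
--
--                 if seats[nx][ny] == 0:  # 주변의 빈 자리 수 확인용
--                     near_empty_cnt += 1
--
--                 if seats[nx][ny] in preference:  # 주변에 좋아하는 친구 확인용
--                     near_preference += 1
--
--             empty_seats.append((x, y, near_empty_cnt, near_preference))
--
--     return empty_seats
-- ===== SOURCE B (Python) =====
-- def find_empty_seat_info(seats, n, preference):
--     # Scatter pass: each cell contributes to its in-bounds neighbors' counts.
--     pref = set(preference)
--     empty_targets = []
--     pref_targets = []
--     for i in range(n):
--         for j in range(n):
--             v = seats[i][j]
--             nbrs = [(a, b) for a, b in ((i - 1, j), (i, j - 1), (i + 1, j), (i, j + 1))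
--                     if 0 <= a < n and 0 <= b < n]
--             if v == 0:
--                 empty_targets += nbrs
--             if v in pref:
--                 pref_targets += nbrs
--     empty_cnt = {}
--     for k in empty_targets:
--         empty_cnt[k] = empty_cnt.get(k, 0) + 1
--     pref_cnt = {}
--     for k in pref_targets:
--         pref_cnt[k] = pref_cnt.get(k, 0) + 1
--     return [(x, y, empty_cnt.get((x, y), 0), pref_cnt.get((x, y), 0))
--             for x in range(n) for y in range(n) if seats[x][y] == 0]
-- ===== Notes on version B (the rewrite author's own statement) =====
-- stated objective: alternative
-- what changed: A gathers counts per empty cell by looping over the 4 directions with two accumulators; B makes one scatter pass in which every cell pushes its in-bounds neighbour coordinates onto an empty-targets and a preferred-targets list (preference turned into a set once), tallies the two lists into dicts, and reads the output off by dict lookup.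
import Mathlib
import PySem

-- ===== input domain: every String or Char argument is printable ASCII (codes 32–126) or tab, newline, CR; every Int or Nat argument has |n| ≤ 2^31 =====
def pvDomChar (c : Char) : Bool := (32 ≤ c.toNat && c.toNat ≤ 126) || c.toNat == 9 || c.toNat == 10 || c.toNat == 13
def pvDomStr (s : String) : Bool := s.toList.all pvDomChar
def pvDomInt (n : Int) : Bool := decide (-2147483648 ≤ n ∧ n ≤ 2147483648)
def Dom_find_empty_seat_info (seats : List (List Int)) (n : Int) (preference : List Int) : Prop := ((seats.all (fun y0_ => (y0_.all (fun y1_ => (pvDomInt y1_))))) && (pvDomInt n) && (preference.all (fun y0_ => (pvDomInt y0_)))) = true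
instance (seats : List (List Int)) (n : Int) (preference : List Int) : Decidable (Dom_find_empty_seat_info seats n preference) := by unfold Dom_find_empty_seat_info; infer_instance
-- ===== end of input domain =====

-- B replaces A's per-empty-cell gather over the 4 directions by a scatter pass: every cell
-- pushes its in-bounds neighbour coordinates onto two target lists (empty / preferred), the
-- lists are counted into dicts, and the output is read off by lookup (objective: alternative).

-- shared indexing primitive: seats[i][j] (in range under Pre_, where Python does not raise)
def pvCell (seats : List (List Int)) (i j : Int) : Int :=
  PySem.List.pyGetD (PySem.List.pyGetD seats i []) j 0

-- ===== PORT A =====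
def pvDxy : List (Int × Int) := [(-1, 0), (0, -1), (1, 0), (0, 1)]

def find_empty_seat_info (seats : List (List Int)) (n : Int) (preference : List Int) : List (Int × Int × Int × Int) :=
  (PySem.List.pyRange 0 n 1).foldl (fun empty_seats x =>
    (PySem.List.pyRange 0 n 1).foldl (fun empty_seats y =>
      if pvCell seats x y ≠ 0 then empty_seats
      else
        let c := pvDxy.foldl (fun (c : Int × Int) d =>
          if x + d.1 < 0 ∨ x + d.1 ≥ n ∨ y + d.2 < 0 ∨ y + d.2 ≥ n then c
          else
            ((if pvCell seats (x + d.1) (y + d.2) = 0 then c.1 + 1 else c.1),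
             (if preference.contains (pvCell seats (x + d.1) (y + d.2)) then c.2 + 1 else c.2))) (0, 0)
        empty_seats ++ [(x, y, c.1, c.2)]) empty_seats) []

-- ===== PORT B =====
def pvNbrs (n i j : Int) : List (Int × Int) :=
  ([(i - 1, j), (i, j - 1), (i + 1, j), (i, j + 1)] : List (Int × Int)).filter
    (fun ab => decide (0 ≤ ab.1 ∧ ab.1 < n ∧ 0 ≤ ab.2 ∧ ab.2 < n))

def find_empty_seat_info_alt (seats : List (List Int)) (n : Int) (preference : List Int) : List (Int × Int × Int × Int) :=
  let pref := PySem.Set.ofList preference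
  let targets := (PySem.List.pyRange 0 n 1).foldl (fun ts i =>
      (PySem.List.pyRange 0 n 1).foldl (fun (ts : List (Int × Int) × List (Int × Int)) j =>
        (if pvCell seats i j = 0 then ts.1 ++ pvNbrs n i j else ts.1,
         if pref.contains (pvCell seats i j) then ts.2 ++ pvNbrs n i j else ts.2)) ts) ([], [])
  let ec := targets.1.foldl (fun d k => d.insert k (d.getD k 0 + 1)) PySem.Dict.empty
  let pc := targets.2.foldl (fun d k => d.insert k (d.getD k 0 + 1)) PySem.Dict.empty
  (PySem.List.pyRange 0 n 1).flatMap (fun x =>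
    (PySem.List.pyRange 0 n 1).flatMap (fun y =>
      if pvCell seats x y = 0 then [(x, y, ec.getD (x, y) 0, pc.getD (x, y) 0)] else []))

-- ===== PRECONDITION & SPEC =====
-- Pre_: exactly where the Python returns normally: the first n rows exist and each has ≥ n
-- entries (otherwise seats[x][y] raises IndexError in both A and B).
def Pre_find_empty_seat_info (seats : List (List Int)) (n : Int) (preference : List Int) : Prop :=
  n ≤ (seats.length : Int) ∧ ∀ row ∈ seats.take n.toNat, n ≤ (row.length : Int)
instance (seats : List (List Int)) (n : Int) (preference : List Int) : Decidable (Pre_find_empty_seat_info seats n preference) := by unfold Pre_find_empty_seat_info; infer_instance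

def pvWitness_find_empty_seat_info : List (List Int) × Int × List Int := ([[0, 1], [2, 0]], 2, [1, 4])

def Spec_find_empty_seat_info (seats : List (List Int)) (n : Int) (preference : List Int) (out : List (Int × Int × Int × Int)) : Prop := out = find_empty_seat_info_alt seats n preference
instance (seats : List (List Int)) (n : Int) (preference : List Int) (out : List (Int × Int × Int × Int)) : Decidable (Spec_find_empty_seat_info seats n preference out) := by unfold Spec_find_empty_seat_info; infer_instance

-- ===== CLAIM (what is proved, stated in full; the proofs are below) =====
def Claim_equal_find_empty_seat_info : Prop := ∀ (seats : List (List Int)) (n : Int) (preference : List Int), Dom_find_empty_seat_info seats n preference → Pre_find_empty_seat_info seats n preference → Spec_find_empty_seat_info seats n preference (find_empty_seat_info seats n preference)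

-- ===== LEMMAS AND PROOFS =====

-- the contribution of direction d to the count of neighbours of (x, y) satisfying p
def gTerm (seats : List (List Int)) (n x y : Int) (p : Int → Prop) [DecidablePred p] (d : Int × Int) : Int :=
  if (0 ≤ x + d.1 ∧ x + d.1 < n ∧ 0 ≤ y + d.2 ∧ y + d.2 < n) ∧ p (pvCell seats (x + d.1) (y + d.2)) then 1 else 0

lemma gTerm_congr (seats : List (List Int)) (n x y : Int) (p q : Int → Prop) [DecidablePred p] [DecidablePred q]
    (h : ∀ v, p v ↔ q v) (d : Int × Int) : gTerm seats n x y p d = gTerm seats n x y q d := by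
  unfold gTerm
  split_ifs <;> first | rfl | (exfalso; simp_all)

-- Σ_{k ∈ range(m)} (if k = a then g k else 0): a one-point sum over a range
lemma sum_ite_point_nat (m : ℕ) (a : Int) (g : Int → Int) :
    ((List.range m).map (fun k : ℕ => if (k : Int) = a then g (k : Int) else 0)).sum
      = if 0 ≤ a ∧ a < (m : Int) then g a else 0 := by
  induction m with
  | zero => simp
  | succ m ih =>
    rw [List.range_succ, List.map_append, List.sum_append, ih]
    simp only [List.map_cons, List.map_nil, List.sum_cons, List.sum_nil]
    split_ifs <;> first | omega | (subst_vars; ring)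

lemma sum_ite_point (n a : Int) (g : Int → Int) :
    ((PySem.List.pyRange 0 n 1).map (fun i => if i = a then g i else 0)).sum
      = if 0 ≤ a ∧ a < n then g a else 0 := by
  rw [PySem.List.pyRange_one, List.map_map]
  rcases (by omega : n ≤ 0 ∨ 0 < n) with h | h
  · have h0 : (n - 0).toNat = 0 := by omega
    rw [h0]
    simp
    omega
  · have h0 : ((n - 0).toNat : Int) = n := by omega
    have hpt := sum_ite_point_nat (n - 0).toNat a g
    rw [h0] at hpt
    rw [← hpt]
    congr 1
    apply List.map_congr_left
    intro k _
    simp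

lemma sum_ite_point2 (n a b : Int) (g : Int → Int → Int) :
    ((PySem.List.pyRange 0 n 1).map (fun i =>
        ((PySem.List.pyRange 0 n 1).map (fun j => if i = a ∧ j = b then g i j else 0)).sum)).sum
      = if 0 ≤ a ∧ a < n ∧ 0 ≤ b ∧ b < n then g a b else 0 := by
  have h1 : ∀ i : Int, ((PySem.List.pyRange 0 n 1).map (fun j => if i = a ∧ j = b then g i j else 0)).sum
      = if i = a then (if 0 ≤ b ∧ b < n then g i b else 0) else 0 := by
    intro i
    by_cases hi : i = a
    · simp only [hi, true_and]
      exact sum_ite_point n b (g a)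
    · simp [hi]
  rw [List.map_congr_left (fun i _ => h1 i)]
  rw [sum_ite_point n a (fun i => if 0 ≤ b ∧ b < n then g i b else 0)]
  split_ifs <;> first | rfl | omega

lemma count_flatMap_int {α : Type} (l : List α) (g : α → List (Int × Int)) (a : Int × Int) :
    (((l.flatMap g).count a : Int)) = (l.map (fun v => (((g v).count a : Int)))).sum := by
  induction l with
  | nil => simp
  | cons x l ih => simp [List.count_append, ih]

-- the value counted at cell (i,j), decomposed into the 4 one-point indicators
lemma percell_decomp (seats : List (List Int)) (n x y i j : Int) (p : Int → Prop) [DecidablePred p]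
    (hx : 0 ≤ x) (hx' : x < n) (hy : 0 ≤ y) (hy' : y < n) :
    (((if p (pvCell seats i j) then pvNbrs n i j else []).count (x, y) : Int))
      = (if i = x + 1 ∧ j = y then (if p (pvCell seats i j) then (1:Int) else 0) else 0)
        + (if i = x ∧ j = y + 1 then (if p (pvCell seats i j) then (1:Int) else 0) else 0)
        + (if i = x - 1 ∧ j = y then (if p (pvCell seats i j) then (1:Int) else 0) else 0)
        + (if i = x ∧ j = y - 1 then (if p (pvCell seats i j) then (1:Int) else 0) else 0) := by
  by_cases hp : p (pvCell seats i j)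
  · simp only [hp, if_pos]
    unfold pvNbrs
    rw [List.count_filter (by simp; omega)]
    simp [List.count_cons, Prod.ext_iff]
    split_ifs <;> omega
  · simp [hp]

lemma sum_map_add4 (l : List Int) (f1 f2 f3 f4 : Int → Int) :
    (l.map (fun x => f1 x + f2 x + f3 x + f4 x)).sum
      = (l.map f1).sum + (l.map f2).sum + (l.map f3).sum + (l.map f4).sum := by
  induction l with
  | nil => simp
  | cons a l ih => simp only [List.map_cons, List.sum_cons, ih]; ring

-- the scatter pass counted at an in-bounds cell (x, y) is the gather sum over the 4 directions
lemma scatter_count (seats : List (List Int)) (n x y : Int) (p : Int → Prop) [DecidablePred p]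
    (hx : 0 ≤ x) (hx' : x < n) (hy : 0 ≤ y) (hy' : y < n) :
    ((((PySem.List.pyRange 0 n 1).flatMap (fun i =>
        (PySem.List.pyRange 0 n 1).flatMap (fun j =>
          if p (pvCell seats i j) then pvNbrs n i j else []))).count (x, y) : Int))
      = (pvDxy.map (gTerm seats n x y p)).sum := by
  rw [count_flatMap_int]
  have h1 : ∀ i : Int, (((( (PySem.List.pyRange 0 n 1).flatMap (fun j =>
      if p (pvCell seats i j) then pvNbrs n i j else []))).count (x, y) : Int))
      = ((PySem.List.pyRange 0 n 1).map (fun j =>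
          (((if p (pvCell seats i j) then pvNbrs n i j else []).count (x, y) : Int)))).sum :=
    fun i => count_flatMap_int _ _ _
  rw [List.map_congr_left (fun i _ => h1 i)]
  have h2 : ∀ i : Int, ((PySem.List.pyRange 0 n 1).map (fun j =>
        (((if p (pvCell seats i j) then pvNbrs n i j else []).count (x, y) : Int)))).sum
      = ((PySem.List.pyRange 0 n 1).map (fun j =>
          (if i = x + 1 ∧ j = y then (if p (pvCell seats i j) then (1:Int) else 0) else 0)
          + (if i = x ∧ j = y + 1 then (if p (pvCell seats i j) then (1:Int) else 0) else 0)
          + (if i = x - 1 ∧ j = y then (if p (pvCell seats i j) then (1:Int) else 0) else 0)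
          + (if i = x ∧ j = y - 1 then (if p (pvCell seats i j) then (1:Int) else 0) else 0))).sum := by
    intro i
    congr 1
    apply List.map_congr_left
    intro j _
    exact percell_decomp seats n x y i j p hx hx' hy hy'
  rw [List.map_congr_left (fun i _ => h2 i)]
  have h3 : ∀ i : Int, ((PySem.List.pyRange 0 n 1).map (fun j =>
          (if i = x + 1 ∧ j = y then (if p (pvCell seats i j) then (1:Int) else 0) else 0)
          + (if i = x ∧ j = y + 1 then (if p (pvCell seats i j) then (1:Int) else 0) else 0)
          + (if i = x - 1 ∧ j = y then (if p (pvCell seats i j) then (1:Int) else 0) else 0)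
          + (if i = x ∧ j = y - 1 then (if p (pvCell seats i j) then (1:Int) else 0) else 0))).sum
      = ((PySem.List.pyRange 0 n 1).map (fun j =>
          (if i = x + 1 ∧ j = y then (if p (pvCell seats i j) then (1:Int) else 0) else 0))).sum
        + ((PySem.List.pyRange 0 n 1).map (fun j =>
          (if i = x ∧ j = y + 1 then (if p (pvCell seats i j) then (1:Int) else 0) else 0))).sum
        + ((PySem.List.pyRange 0 n 1).map (fun j =>
          (if i = x - 1 ∧ j = y then (if p (pvCell seats i j) then (1:Int) else 0) else 0))).sum
        + ((PySem.List.pyRange 0 n 1).map (fun j =>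
          (if i = x ∧ j = y - 1 then (if p (pvCell seats i j) then (1:Int) else 0) else 0))).sum :=
    fun i => sum_map_add4 _
      (fun j => if i = x + 1 ∧ j = y then (if p (pvCell seats i j) then (1:Int) else 0) else 0)
      (fun j => if i = x ∧ j = y + 1 then (if p (pvCell seats i j) then (1:Int) else 0) else 0)
      (fun j => if i = x - 1 ∧ j = y then (if p (pvCell seats i j) then (1:Int) else 0) else 0)
      (fun j => if i = x ∧ j = y - 1 then (if p (pvCell seats i j) then (1:Int) else 0) else 0)
  rw [List.map_congr_left (fun i _ => h3 i)]
  rw [sum_map_add4 _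
      (fun i => ((PySem.List.pyRange 0 n 1).map (fun j =>
          (if i = x + 1 ∧ j = y then (if p (pvCell seats i j) then (1:Int) else 0) else 0))).sum)
      (fun i => ((PySem.List.pyRange 0 n 1).map (fun j =>
          (if i = x ∧ j = y + 1 then (if p (pvCell seats i j) then (1:Int) else 0) else 0))).sum)
      (fun i => ((PySem.List.pyRange 0 n 1).map (fun j =>
          (if i = x - 1 ∧ j = y then (if p (pvCell seats i j) then (1:Int) else 0) else 0))).sum)
      (fun i => ((PySem.List.pyRange 0 n 1).map (fun j =>
          (if i = x ∧ j = y - 1 then (if p (pvCell seats i j) then (1:Int) else 0) else 0))).sum)]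
  rw [sum_ite_point2 n (x + 1) y (fun i j => if p (pvCell seats i j) then (1:Int) else 0)]
  rw [sum_ite_point2 n x (y + 1) (fun i j => if p (pvCell seats i j) then (1:Int) else 0)]
  rw [sum_ite_point2 n (x - 1) y (fun i j => if p (pvCell seats i j) then (1:Int) else 0)]
  rw [sum_ite_point2 n x (y - 1) (fun i j => if p (pvCell seats i j) then (1:Int) else 0)]
  have e1 : (if 0 ≤ x + 1 ∧ x + 1 < n ∧ 0 ≤ y ∧ y < n then (if p (pvCell seats (x + 1) y) then (1:Int) else 0) else 0)
      = gTerm seats n x y p (1, 0) := by simp [gTerm, ite_and]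
  have e2 : (if 0 ≤ x ∧ x < n ∧ 0 ≤ y + 1 ∧ y + 1 < n then (if p (pvCell seats x (y + 1)) then (1:Int) else 0) else 0)
      = gTerm seats n x y p (0, 1) := by simp [gTerm, ite_and]
  have e3 : (if 0 ≤ x - 1 ∧ x - 1 < n ∧ 0 ≤ y ∧ y < n then (if p (pvCell seats (x - 1) y) then (1:Int) else 0) else 0)
      = gTerm seats n x y p (-1, 0) := by simp only [gTerm, ite_and, sub_eq_add_neg, add_zero]
  have e4 : (if 0 ≤ x ∧ x < n ∧ 0 ≤ y - 1 ∧ y - 1 < n then (if p (pvCell seats x (y - 1)) then (1:Int) else 0) else 0)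
      = gTerm seats n x y p (0, -1) := by simp only [gTerm, ite_and, sub_eq_add_neg, add_zero]
  rw [e1, e2, e3, e4]
  simp only [pvDxy, List.map_cons, List.map_nil, List.sum_cons, List.sum_nil]
  ring

-- A's inner direction loop computes the two gather sums
lemma gather_fold (seats : List (List Int)) (n : Int) (preference : List Int) (x y : Int)
    (ds : List (Int × Int)) (c : Int × Int) :
    ds.foldl (fun (c : Int × Int) d =>
        if x + d.1 < 0 ∨ x + d.1 ≥ n ∨ y + d.2 < 0 ∨ y + d.2 ≥ n then c
        else
          ((if pvCell seats (x + d.1) (y + d.2) = 0 then c.1 + 1 else c.1),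
           (if preference.contains (pvCell seats (x + d.1) (y + d.2)) then c.2 + 1 else c.2))) c
      = (c.1 + (ds.map (gTerm seats n x y (fun v => v = 0))).sum,
         c.2 + (ds.map (gTerm seats n x y (fun v => preference.contains v = true))).sum) := by
  induction ds generalizing c with
  | nil => simp
  | cons d ds ih =>
    simp only [List.foldl_cons, List.map_cons, List.sum_cons, ih]
    unfold gTerm
    split_ifs <;> simp_all <;> omega

-- A's per-empty-cell direction-loop result
def aPair (seats : List (List Int)) (n : Int) (preference : List Int) (x y : Int) : Int × Int :=
  pvDxy.foldl (fun (c : Int × Int) d =>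
    if x + d.1 < 0 ∨ x + d.1 ≥ n ∨ y + d.2 < 0 ∨ y + d.2 ≥ n then c
    else
      ((if pvCell seats (x + d.1) (y + d.2) = 0 then c.1 + 1 else c.1),
       (if preference.contains (pvCell seats (x + d.1) (y + d.2)) then c.2 + 1 else c.2))) (0, 0)

-- B's scatter pass, as a flat list of targeted coordinates
def scat (seats : List (List Int)) (n : Int) (p : Int → Prop) [DecidablePred p] : List (Int × Int) :=
  (PySem.List.pyRange 0 n 1).flatMap (fun i =>
    (PySem.List.pyRange 0 n 1).flatMap (fun j =>
      if p (pvCell seats i j) then pvNbrs n i j else []))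

lemma A_norm (seats : List (List Int)) (n : Int) (preference : List Int) :
    find_empty_seat_info seats n preference
      = (PySem.List.pyRange 0 n 1).flatMap (fun x =>
          (PySem.List.pyRange 0 n 1).flatMap (fun y =>
            if pvCell seats x y = 0 then
              [(x, y, (aPair seats n preference x y).1, (aPair seats n preference x y).2)]
            else [])) := by
  show (PySem.List.pyRange 0 n 1).foldl (fun empty_seats x =>
      (PySem.List.pyRange 0 n 1).foldl (fun empty_seats y =>
        if pvCell seats x y ≠ 0 then empty_seats
        else empty_seats ++ [(x, y, (aPair seats n preference x y).1, (aPair seats n preference x y).2)])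
        empty_seats) [] = _
  have h1 : ∀ x : Int, (fun (empty_seats : List (Int × Int × Int × Int)) (y : Int) =>
        if pvCell seats x y ≠ 0 then empty_seats
        else empty_seats ++ [(x, y, (aPair seats n preference x y).1, (aPair seats n preference x y).2)])
      = (fun empty_seats y => empty_seats ++ (if pvCell seats x y = 0 then
          [(x, y, (aPair seats n preference x y).1, (aPair seats n preference x y).2)] else [])) := by
    intro x
    funext acc y
    by_cases h : pvCell seats x y = 0 <;> simp [h]
  have h2 : (fun (acc : List (Int × Int × Int × Int)) (x : Int) =>
        (PySem.List.pyRange 0 n 1).foldl (fun empty_seats y =>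
          if pvCell seats x y ≠ 0 then empty_seats
          else empty_seats ++ [(x, y, (aPair seats n preference x y).1, (aPair seats n preference x y).2)])
          acc)
      = (fun acc x => acc ++ (PySem.List.pyRange 0 n 1).flatMap (fun y =>
          if pvCell seats x y = 0 then
            [(x, y, (aPair seats n preference x y).1, (aPair seats n preference x y).2)] else [])) := by
    funext acc x
    rw [h1 x]
    exact PySem.List.foldl_append_eq_flatMap _ _ _
  rw [h2, PySem.List.foldl_append_eq_flatMap, List.nil_append]

lemma B_norm (seats : List (List Int)) (n : Int) (preference : List Int) :
    find_empty_seat_info_alt seats n preference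
      = (PySem.List.pyRange 0 n 1).flatMap (fun x =>
          (PySem.List.pyRange 0 n 1).flatMap (fun y =>
            if pvCell seats x y = 0 then
              [(x, y,
                ((scat seats n (fun v => v = 0)).foldl
                  (fun d k => d.insert k (d.getD k 0 + 1)) PySem.Dict.empty).getD (x, y) 0,
                ((scat seats n (fun v => (PySem.Set.ofList preference).contains v = true)).foldl
                  (fun d k => d.insert k (d.getD k 0 + 1)) PySem.Dict.empty).getD (x, y) 0)]
            else [])) := by
  have htg : ((PySem.List.pyRange 0 n 1).foldl (fun ts i =>
        (PySem.List.pyRange 0 n 1).foldl (fun (ts : List (Int × Int) × List (Int × Int)) j =>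
          (if pvCell seats i j = 0 then ts.1 ++ pvNbrs n i j else ts.1,
           if (PySem.Set.ofList preference).contains (pvCell seats i j) then ts.2 ++ pvNbrs n i j else ts.2))
          ts) (([], []) : List (Int × Int) × List (Int × Int)))
      = (scat seats n (fun v => v = 0),
         scat seats n (fun v => (PySem.Set.ofList preference).contains v = true)) := by
    have hin : (fun (ts : List (Int × Int) × List (Int × Int)) (i : Int) =>
          (PySem.List.pyRange 0 n 1).foldl (fun (ts : List (Int × Int) × List (Int × Int)) j =>
            (if pvCell seats i j = 0 then ts.1 ++ pvNbrs n i j else ts.1,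
             if (PySem.Set.ofList preference).contains (pvCell seats i j) then ts.2 ++ pvNbrs n i j else ts.2))
            ts)
        = (fun ts i =>
            (ts.1 ++ (PySem.List.pyRange 0 n 1).flatMap (fun j =>
                if pvCell seats i j = 0 then pvNbrs n i j else []),
             ts.2 ++ (PySem.List.pyRange 0 n 1).flatMap (fun j =>
                if (PySem.Set.ofList preference).contains (pvCell seats i j) = true then pvNbrs n i j else []))) := by
      funext ts i
      rw [PySem.List.foldl_prod_mk
        (f := fun acc j => if pvCell seats i j = 0 then acc ++ pvNbrs n i j else acc)
        (g := fun acc j => if (PySem.Set.ofList preference).contains (pvCell seats i j) then acc ++ pvNbrs n i j else acc)]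
      have hf : (fun (acc : List (Int × Int)) (j : Int) => if pvCell seats i j = 0 then acc ++ pvNbrs n i j else acc)
          = (fun acc j => acc ++ (if pvCell seats i j = 0 then pvNbrs n i j else [])) := by
        funext acc j
        by_cases h : pvCell seats i j = 0 <;> simp [h]
      have hg : (fun (acc : List (Int × Int)) (j : Int) => if (PySem.Set.ofList preference).contains (pvCell seats i j) then acc ++ pvNbrs n i j else acc)
          = (fun acc j => acc ++ (if (PySem.Set.ofList preference).contains (pvCell seats i j) = true then pvNbrs n i j else [])) := by
        funext acc j
        split_ifs <;> simp_all
      rw [hf, hg, PySem.List.foldl_append_eq_flatMap, PySem.List.foldl_append_eq_flatMap]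
    rw [hin]
    rw [PySem.List.foldl_prod_mk
      (f := fun acc i => acc ++ (PySem.List.pyRange 0 n 1).flatMap (fun j =>
          if pvCell seats i j = 0 then pvNbrs n i j else []))
      (g := fun acc i => acc ++ (PySem.List.pyRange 0 n 1).flatMap (fun j =>
          if (PySem.Set.ofList preference).contains (pvCell seats i j) = true then pvNbrs n i j else []))]
    rw [PySem.List.foldl_append_eq_flatMap, PySem.List.foldl_append_eq_flatMap]
    simp only [List.nil_append]
    rfl
  unfold find_empty_seat_info_alt
  simp only []
  rw [htg]

-- ===== VERDICT (by name: the statement is the Claim_ definition above) =====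
theorem find_empty_seat_info_spec : Claim_equal_find_empty_seat_info := by
  intro seats n preference _ _
  unfold Spec_find_empty_seat_info
  rw [A_norm, B_norm]
  apply List.flatMap_congr
  intro x hx
  apply List.flatMap_congr
  intro y hy
  rw [PySem.List.mem_pyRange_one] at hx hy
  by_cases hc : pvCell seats x y = 0
  · rw [if_pos hc, if_pos hc]
    have hA : aPair seats n preference x y
        = ((pvDxy.map (gTerm seats n x y (fun v => v = 0))).sum,
           (pvDxy.map (gTerm seats n x y (fun v => preference.contains v = true))).sum) := by
      unfold aPair
      rw [gather_fold]
      simp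
    have hE : ((scat seats n (fun v => v = 0)).foldl
          (fun d k => d.insert k (d.getD k 0 + 1)) PySem.Dict.empty).getD (x, y) 0
        = (pvDxy.map (gTerm seats n x y (fun v => v = 0))).sum := by
      rw [PySem.Dict.getD_foldl_insert_add_one]
      rw [show (scat seats n (fun v => v = 0)).count (x, y)
            = ((PySem.List.pyRange 0 n 1).flatMap (fun i =>
                (PySem.List.pyRange 0 n 1).flatMap (fun j =>
                  if pvCell seats i j = 0 then pvNbrs n i j else []))).count (x, y) from rfl]
      rw [scatter_count seats n x y (fun v => v = 0) hx.1 hx.2 hy.1 hy.2]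
      simp [PySem.Dict.getD_empty]
    have hP : ((scat seats n (fun v => (PySem.Set.ofList preference).contains v = true)).foldl
          (fun d k => d.insert k (d.getD k 0 + 1)) PySem.Dict.empty).getD (x, y) 0
        = (pvDxy.map (gTerm seats n x y (fun v => preference.contains v = true))).sum := by
      rw [PySem.Dict.getD_foldl_insert_add_one]
      rw [show (scat seats n (fun v => (PySem.Set.ofList preference).contains v = true)).count (x, y)
            = ((PySem.List.pyRange 0 n 1).flatMap (fun i =>
                (PySem.List.pyRange 0 n 1).flatMap (fun j =>
                  if (PySem.Set.ofList preference).contains (pvCell seats i j) = true then pvNbrs n i j else []))).count (x, y) from rfl]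
      rw [scatter_count seats n x y (fun v => (PySem.Set.ofList preference).contains v = true) hx.1 hx.2 hy.1 hy.2]
      rw [List.map_congr_left (fun d _ => gTerm_congr seats n x y
        (fun v => (PySem.Set.ofList preference).contains v = true)
        (fun v => preference.contains v = true)
        (fun v => by
          simp [PySem.Set.mem_ofList]) d)]
      simp [PySem.Dict.getD_empty]
    rw [hA, hE, hP]
  · rw [if_neg hc, if_neg hc]
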